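-- pv_equiv track=rewrite | github.com/Advanced-AIgpt/Yandex-Full-Source | alice/boltalka/generative/pipelines/factor_dssm/calc_factor_dssm.py | remove_trailing_none
-- ===== SOURCE A (Python) =====
-- def remove_trailing_none(list):
--     result = []
--     found_not_none = False
--     for item in list:
--         if found_not_none:
--             result.append(item)
--         else:
--             if item is not None:
--                 found_not_none = True
--                 result.append(item)
--
--     return result
-- ===== SOURCE B (Python) =====
-- def remove_trailing_none(list):
--     idx = next((i for i, x in enumerate(list) if x is not None), len(list))
--     return list[idx:]
-- ===== Notes on version B (the rewrite author's own statement) =====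
-- stated objective: simpler
-- what changed: B scans once for the index of the first non-None element and returns the slice from there, replacing A's per-item append loop guarded by a found_not_none flag.
import Mathlib
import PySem

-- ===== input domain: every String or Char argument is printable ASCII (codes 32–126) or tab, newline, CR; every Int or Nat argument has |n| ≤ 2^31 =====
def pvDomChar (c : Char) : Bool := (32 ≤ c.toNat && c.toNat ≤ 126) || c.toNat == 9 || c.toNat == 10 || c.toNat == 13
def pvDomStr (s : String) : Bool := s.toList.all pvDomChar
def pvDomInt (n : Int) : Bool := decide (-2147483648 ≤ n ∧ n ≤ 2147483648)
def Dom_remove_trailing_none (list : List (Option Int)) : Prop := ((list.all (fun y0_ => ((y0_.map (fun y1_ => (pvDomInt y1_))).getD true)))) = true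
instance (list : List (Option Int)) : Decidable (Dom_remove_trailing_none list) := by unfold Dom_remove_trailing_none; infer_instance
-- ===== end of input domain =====

-- B replaces A's per-item append loop with a boundary scan (index of the first
-- non-None) followed by a single slice; objective: simpler. Neither version
-- mutates its argument.

-- ===== PORT A =====
-- A: foldl over (result, found_not_none), appending item by item.
def remove_trailing_none (list : List (Option Int)) : List (Option Int) :=
  (list.foldl (fun (st : List (Option Int) × Bool) item =>
      if st.2 then (st.1 ++ [item], st.2)
      else if item ≠ none then (st.1 ++ [item], true) else st)
    ([], false)).1

-- ===== PORT B =====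
-- B helper: index of the first non-None element, defaulting to the length
-- (the `next((i for i, x in enumerate(list) if x is not None), len(list))` scan).
def rtnFirstIdx : List (Option Int) → Nat
  | [] => 0
  | x :: xs => if x ≠ none then 0 else rtnFirstIdx xs + 1

def remove_trailing_none_alt (list : List (Option Int)) : List (Option Int) :=
  PySem.List.slice list (some ((rtnFirstIdx list : Nat) : Int)) none

-- ===== PRECONDITION & SPEC =====
def Spec_remove_trailing_none (list : List (Option Int)) (out : List (Option Int)) : Prop := out = remove_trailing_none_alt list
instance (list : List (Option Int)) (out : List (Option Int)) : Decidable (Spec_remove_trailing_none list out) := by unfold Spec_remove_trailing_none; infer_instance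

-- ===== CLAIM (what is proved, stated in full; the proofs are below) =====
def Claim_equal_remove_trailing_none : Prop := ∀ (list : List (Option Int)), Dom_remove_trailing_none list → Spec_remove_trailing_none list (remove_trailing_none list)

-- ===== LEMMAS AND PROOFS =====

-- Once the flag is set, A's loop appends every remaining item.
theorem rtn_foldl_flag_true (xs : List (Option Int)) (acc : List (Option Int)) :
    (xs.foldl (fun (st : List (Option Int) × Bool) item =>
      if st.2 then (st.1 ++ [item], st.2)
      else if item ≠ none then (st.1 ++ [item], true) else st)
      (acc, true)) = (acc ++ xs, true) := by
  induction xs generalizing acc with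
  | nil => simp
  | cons x xs ih =>
    show (xs.foldl _ (acc ++ [x], true)) = _
    rw [ih]; simp

theorem rtn_eq (xs : List (Option Int)) :
    (xs.foldl (fun (st : List (Option Int) × Bool) item =>
      if st.2 then (st.1 ++ [item], st.2)
      else if item ≠ none then (st.1 ++ [item], true) else st)
      ([], false)).1 = xs.drop (rtnFirstIdx xs) := by
  induction xs with
  | nil => simp [rtnFirstIdx]
  | cons x xs ih =>
    rw [List.foldl_cons]
    by_cases h : x = none
    · simpa [rtnFirstIdx, h] using ih
    · simp only [h, if_neg, ne_eq, not_false_iff, if_true, Bool.false_eq_true, if_false,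
        List.nil_append, rtn_foldl_flag_true]
      simp [rtnFirstIdx, h]

-- ===== VERDICT (by name: the statement is the Claim_ definition above) =====
theorem remove_trailing_none_spec : Claim_equal_remove_trailing_none := by
  intro list _
  unfold Spec_remove_trailing_none remove_trailing_none remove_trailing_none_alt
  rw [rtn_eq, PySem.List.slice_from_natCast]
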